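-- pv_equiv track=rewrite | github.com/whitemarshmallow/wirelessassistent | agent_sql_r1_pingpong_knowledge_memory_6000_smallmodelact_select.py | _keep_system_and_last_two_pairs
-- ===== SOURCE A (Python) =====
-- def _keep_system_and_last_two_pairs(messages):
--     """
--     保留所有 system 消息(按出现顺序)；
--     然后在 normal_msgs (user/assistant) 中，从后往前找最多2组 (user->assistant) 对。
--     如果找不到相邻的 user，就跳过该 assistant，从而避免“assistant”脱离上下文。
--     最后拼装并返回：system 消息 + 收集到的对话对（保持原有顺序）。
--     """
--     # 1. 分离 system 与普通消息
--     system_msgs = []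
--     normal_msgs = []
--     for msg in messages:
--         if msg["role"] == "system":
--             system_msgs.append(msg)
--         else:
--             normal_msgs.append(msg)
--
--     # 2. 从后往前收集最多2组 (user, assistant) 对
--     pairs_collected = []
--     pair_count = 0
--     i = len(normal_msgs) - 1
--     while i >= 0 and pair_count < 2:
--         if normal_msgs[i]["role"] == "assistant":
--             assistant_msg = normal_msgs[i]
--             i -= 1
--             # 查找与它相邻的 user 消息
--             if i >= 0 and normal_msgs[i]["role"] == "user":
--                 user_msg = normal_msgs[i]
--                 i -= 1
--             else:
--                 # 如果前一条不是 user，则跳过这个 assistant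
--                 continue
--
--             # 插入这组对（保持正序：先 user 后 assistant）
--             pairs_collected.insert(0, user_msg)
--             pairs_collected.insert(1, assistant_msg)
--             pair_count += 1
--         else:
--             i -= 1
--
--     # 3. 拼装：先 system 消息，再加上 normal 的最近对话
--     final = system_msgs + pairs_collected
--     return final
-- ===== SOURCE B (Python) =====
-- def _keep_system_and_last_two_pairs(messages):
--     system_msgs = [m for m in messages if m["role"] == "system"]
--     normal_msgs = [m for m in messages if m["role"] != "system"]
--     starts = [i for i in range(len(normal_msgs) - 1)
--               if normal_msgs[i]["role"] == "user"
--               and normal_msgs[i + 1]["role"] == "assistant"]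
--     pairs = [normal_msgs[j] for i in starts[-2:] for j in (i, i + 1)]
--     return system_msgs + pairs
-- ===== Notes on version B (the rewrite author's own statement) =====
-- stated objective: simpler
-- what changed: Replaced the backward while-loop with mutable index, pair counter and insert(0)/insert(1) splicing by a forward comprehension of user->assistant pair start indices, of which the last two are taken and flattened in order.
import Mathlib
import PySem

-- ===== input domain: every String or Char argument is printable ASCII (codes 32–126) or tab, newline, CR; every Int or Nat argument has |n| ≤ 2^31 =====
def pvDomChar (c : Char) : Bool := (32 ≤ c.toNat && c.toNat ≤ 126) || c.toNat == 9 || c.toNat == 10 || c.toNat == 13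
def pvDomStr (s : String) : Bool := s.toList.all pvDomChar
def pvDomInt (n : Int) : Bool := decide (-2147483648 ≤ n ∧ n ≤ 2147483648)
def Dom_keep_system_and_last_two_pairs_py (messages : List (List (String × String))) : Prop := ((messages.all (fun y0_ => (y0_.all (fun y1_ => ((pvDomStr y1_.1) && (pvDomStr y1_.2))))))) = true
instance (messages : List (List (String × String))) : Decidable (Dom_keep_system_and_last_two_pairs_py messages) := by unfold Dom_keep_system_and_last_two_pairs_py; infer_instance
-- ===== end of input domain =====

-- B replaces A's backward index-walk with insert(0)/insert(1) splicing by a forward table of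
-- user->assistant pair start indices whose last two are flattened ("simpler" decomposition).


-- msg["role"]: first-match dict lookup; under Pre_ the key is present, so getD "" is exact there
def pvRole (msg : List (String × String)) : String :=
  (PySem.Dict.get? (PySem.Dict.mk msg) "role").getD ""

-- ===== PORT A =====
-- step 1: one loop splitting messages into (system_msgs, normal_msgs)
def pvAsplit (messages : List (List (String × String))) :
    List (List (String × String)) × List (List (String × String)) :=
  messages.foldl
    (fun acc msg =>
      if pvRole msg = "system" then (acc.1 ++ [msg], acc.2) else (acc.1, acc.2 ++ [msg]))
    ([], [])

-- step 2: the backward while-loop; parameter k = i + 1 (so k = 0 means i = -1, loop ends);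
-- acc is pairs_collected, the insert(0,u)/insert(1,a) pair is prepended.
def pvAloop (normal : List (List (String × String))) :
    Nat → Nat → List (List (String × String)) → List (List (String × String))
  | 0, _, acc => acc
  | k + 1, cnt, acc =>
    if cnt < 2 then
      if pvRole (normal.getD k []) = "assistant" then
        if k ≥ 1 ∧ pvRole (normal.getD (k - 1) []) = "user" then
          pvAloop normal (k - 1) (cnt + 1) (normal.getD (k - 1) [] :: normal.getD k [] :: acc)
        else
          pvAloop normal k cnt acc
      else
        pvAloop normal k cnt acc
    else acc

def keep_system_and_last_two_pairs_py (messages : List (List (String × String))) : List (List (String × String)) :=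
  let s := pvAsplit messages
  s.1 ++ pvAloop s.2 s.2.length 0 []

-- ===== PORT B =====
def pvPairStart (normal : List (List (String × String))) (i : Nat) : Bool :=
  pvRole (normal.getD i []) == "user" && pvRole (normal.getD (i + 1) []) == "assistant"

def keep_system_and_last_two_pairs_py_alt (messages : List (List (String × String))) : List (List (String × String)) :=
  let system_msgs := messages.filter (fun m => pvRole m == "system")
  let normal := messages.filter (fun m => pvRole m != "system")
  let starts := (List.range (normal.length - 1)).filter (pvPairStart normal)
  let take := starts.drop (starts.length - 2)   -- starts[-2:]
  system_msgs ++ take.flatMap (fun i => [normal.getD i [], normal.getD (i + 1) []])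

-- ===== PRECONDITION & SPEC =====
-- Pre_ excludes exactly the inputs where some message lacks a "role" key: there Python A
-- (and Python B alike) raises KeyError.
def Pre_keep_system_and_last_two_pairs_py (messages : List (List (String × String))) : Prop :=
  ∀ msg ∈ messages, (PySem.Dict.get? (PySem.Dict.mk msg) "role").isSome = true
instance (messages : List (List (String × String))) : Decidable (Pre_keep_system_and_last_two_pairs_py messages) := by unfold Pre_keep_system_and_last_two_pairs_py; infer_instance

def pvWitness_keep_system_and_last_two_pairs_py : (List (List (String × String))) :=
  [[("role", "system"), ("content", "s")],
   [("role", "user"), ("content", "q1")],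
   [("role", "assistant"), ("content", "a1")],
   [("role", "user"), ("content", "q2")],
   [("role", "assistant"), ("content", "a2")]]

def Spec_keep_system_and_last_two_pairs_py (messages : List (List (String × String))) (out : List (List (String × String))) : Prop := out = keep_system_and_last_two_pairs_py_alt messages
instance (messages : List (List (String × String))) (out : List (List (String × String))) : Decidable (Spec_keep_system_and_last_two_pairs_py messages out) := by unfold Spec_keep_system_and_last_two_pairs_py; infer_instance

-- ===== CLAIM (what is proved, stated in full; the proofs are below) =====
def Claim_equal_keep_system_and_last_two_pairs_py : Prop := ∀ (messages : List (List (String × String))), Dom_keep_system_and_last_two_pairs_py messages → Pre_keep_system_and_last_two_pairs_py messages → Spec_keep_system_and_last_two_pairs_py messages (keep_system_and_last_two_pairs_py messages)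

-- ===== LEMMAS AND PROOFS =====

-- the split loop computes the two filters
theorem pvAsplit_go (messages : List (List (String × String)))
    (s n : List (List (String × String))) :
    messages.foldl
      (fun acc msg =>
        if pvRole msg = "system" then (acc.1 ++ [msg], acc.2) else (acc.1, acc.2 ++ [msg]))
      (s, n)
    = (s ++ messages.filter (fun m => pvRole m == "system"),
       n ++ messages.filter (fun m => pvRole m != "system")) := by
  induction messages generalizing s n with
  | nil => simp
  | cons m ms ih =>
    simp only [List.foldl_cons, List.filter_cons]
    by_cases h : pvRole m = "system" <;> simp [h, ih]

theorem pvAsplit_eq (messages : List (List (String × String))) :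
    pvAsplit messages
    = (messages.filter (fun m => pvRole m == "system"),
       messages.filter (fun m => pvRole m != "system")) := by
  simpa using pvAsplit_go messages [] []

-- start indices among the first k-1 positions
def pvStartsBelow (normal : List (List (String × String))) (k : Nat) : List Nat :=
  (List.range (k - 1)).filter (pvPairStart normal)

def pvPairsOf (normal : List (List (String × String))) (l : List Nat) : List (List (String × String)) :=
  l.flatMap (fun i => [normal.getD i [], normal.getD (i + 1) []])

-- stepping k+1 -> k does not lose a start when position k-1 is not a start
theorem pvStartsBelow_succ (normal : List (List (String × String))) (k : Nat)
    (h : k = 0 ∨ pvPairStart normal (k - 1) = false) :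
    pvStartsBelow normal (k + 1) = pvStartsBelow normal k := by
  unfold pvStartsBelow
  rcases h with h | h
  · subst h; rfl
  · match k with
    | 0 => rfl
    | k' + 1 =>
      have h' : pvPairStart normal k' = false := by simpa using h
      simp only [Nat.add_sub_cancel, List.range_succ, List.filter_append]
      simp [h']

-- drop of an appended singleton: xs[-m:] with one more element at the end, m ≥ 1
theorem pvDrop_append_one {α : Type} (S : List α) (j : α) (m : Nat) (hm : 1 ≤ m) :
    (S ++ [j]).drop ((S ++ [j]).length - m) = S.drop (S.length - (m - 1)) ++ [j] := by
  rw [List.drop_append_of_le_length (by simp; omega)]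
  congr 2
  simp
  omega

-- the main invariant: the backward greedy loop collects exactly the last (2 - cnt) pair starts
theorem pvAloop_eq (normal : List (List (String × String))) (k : Nat) :
    ∀ (cnt : Nat) (acc : List (List (String × String))),
      pvAloop normal k cnt acc
      = pvPairsOf normal
          ((pvStartsBelow normal k).drop ((pvStartsBelow normal k).length - (2 - cnt))) ++ acc := by
  induction k using Nat.strong_induction_on with
  | _ k ih =>
    intro cnt acc
    match k with
    | 0 =>
      simp [pvAloop, pvStartsBelow, pvPairsOf]
    | k + 1 =>
      rw [pvAloop]
      by_cases hc : cnt < 2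
      · simp only [if_pos hc]
        by_cases ha : pvRole (normal.getD k []) = "assistant"
        · simp only [if_pos ha]
          by_cases hu : k ≥ 1 ∧ pvRole (normal.getD (k - 1) []) = "user"
          · simp only [if_pos hu]
            obtain ⟨hk1, hur⟩ := hu
            rw [ih (k - 1) (by omega)]
            have hk : k - 1 + 1 = k := by omega
            have hstart : pvPairStart normal (k - 1) = true := by
              simp only [pvPairStart, hk]
              rw [hur, ha]
              rfl
            have hsplit : pvStartsBelow normal (k + 1)
                = pvStartsBelow normal (k - 1) ++ [k - 1] := by
              unfold pvStartsBelow
              have h1 : k + 1 - 1 = (k - 1) + 1 := by omega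
              rw [h1, List.range_succ, List.filter_append]
              have hfa : List.filter (pvPairStart normal) [k - 1] = [k - 1] := by
                simp [hstart]
              rw [hfa]
              congr 1
              by_cases hk2 : 2 ≤ k
              · have h3 : k - 1 - 1 = k - 2 := by omega
                rw [h3]
                have hr : List.range (k - 1) = List.range (k - 2) ++ [k - 2] := by
                  rw [show k - 1 = (k - 2) + 1 by omega, List.range_succ]
                have hnot : pvPairStart normal (k - 2) = false := by
                  have h4 : k - 2 + 1 = k - 1 := by omega
                  simp only [pvPairStart, h4]
                  rw [hur]
                  simp
                rw [hr, List.filter_append]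
                simp [hnot]
              · have hk1' : k = 1 := by omega
                subst hk1'; rfl
            rw [hsplit]
            rw [pvDrop_append_one _ _ _ (by omega)]
            have hcnt : 2 - cnt - 1 = 2 - (cnt + 1) := by omega
            simp only [pvPairsOf, List.flatMap_append, List.flatMap_cons, List.flatMap_nil,
              List.append_nil, hk, hcnt, List.append_assoc]
            rfl
          · simp only [if_neg hu]
            rw [ih k (by omega)]
            rw [pvStartsBelow_succ normal k ?_]
            by_cases hk0 : k = 0
            · exact Or.inl hk0
            · refine Or.inr ?_
              have hne : pvRole (normal.getD (k - 1) []) ≠ "user" := fun hh =>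
                hu ⟨by omega, hh⟩
              simp only [pvPairStart]
              rw [beq_eq_false_iff_ne.mpr hne, Bool.false_and]
        · simp only [if_neg ha]
          rw [ih k (by omega)]
          rw [pvStartsBelow_succ normal k ?_]
          by_cases hk0 : k = 0
          · exact Or.inl hk0
          · refine Or.inr ?_
            have hk : k - 1 + 1 = k := by omega
            simp only [pvPairStart, hk]
            rw [beq_eq_false_iff_ne.mpr ha, Bool.and_false]
      · simp only [if_neg hc]
        have h0 : 2 - cnt = 0 := by omega
        simp [h0, pvPairsOf]

-- ===== VERDICT (by name: the statement is the Claim_ definition above) =====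
theorem keep_system_and_last_two_pairs_py_spec : Claim_equal_keep_system_and_last_two_pairs_py := by
  intro messages _ _
  unfold Spec_keep_system_and_last_two_pairs_py
  unfold keep_system_and_last_two_pairs_py keep_system_and_last_two_pairs_py_alt
  rw [pvAsplit_eq]
  simp only
  rw [pvAloop_eq]
  simp [pvPairsOf, pvStartsBelow]
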